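-- pv_equiv track=rewrite | github.com/juderozario08/PythonProjectsMAC | TruthTableSimulator.py | termTruthTable
-- ===== SOURCE A (Python) =====
-- def termTruthTable(term, boolInputs, realNumOfInputs, POS_Format, SOP_Format):
--     termTable = []  # Empty truth table for the terms
--     termInputs = []  # The types of input in the term
--     if SOP_Format:
--         for i in range(len(term)):
--             # Check whether the input is a complement or not
--             # Then use the values from the boolInputs dictionary to figure out the final bool value of the term
--             if term[i:i+2] == term[i] + "'" or term[i:i+2] == term[i] + "`":
--                 termInputs.append(term[i] + "'")
--                 i += 1
--             elif term[i].isalpha():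
--                 termInputs.append(term[i])
--         # Default bool value for the term
--         termBool = False
--         # If all there is a single input that is false, break out of loop and change bool of the term to false
--         # Else make the boolean value True and then append it to the truth table for the term
--         for i in range(2**realNumOfInputs):
--             for j in termInputs:
--                 if not boolInputs[j][i]:
--                     termBool = False
--                     break
--                 else:
--                     termBool = True
--             termTable.append(termBool)
--         # Return the truth table of the term
--         return termTable
--     elif POS_Format:
--         # Since it is an or condition, we break out of the loop if any of the terms return True
--         termInputs = term.split("+")
--         termBool = False
--         for i in range(2**realNumOfInputs):
--             for j in termInputs:
--                 if boolInputs[j][i]: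
--                     termBool = True
--                     break
--                 else:
--                     termBool = False
--             termTable.append(termBool)
--         return termTable
-- ===== SOURCE B (Python) =====
-- # Column-major re-implementation: folds whole literal columns together with AND/OR
-- # instead of A's row-major double loop with a carried break flag.
-- def _parseLiterals(term):
--     if term == "":
--         return []
--     c, rest = term[0], term[1:]
--     if rest[:1] == "'" or rest[:1] == "`":
--         return [c + "'"] + _parseLiterals(rest)
--     if c.isalpha():
--         return [c] + _parseLiterals(rest)
--     return _parseLiterals(rest)
--
-- def termTruthTable(term, boolInputs, realNumOfInputs, POS_Format, SOP_Format):
--     n = 2 ** realNumOfInputs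
--     if SOP_Format:
--         lits = _parseLiterals(term)
--         # a term with no literals at all yields the all-False column (A's convention)
--         col = [bool(lits)] * n
--         for j in lits:
--             col = [a and b for a, b in zip(col, boolInputs[j])]
--         return col
--     if POS_Format:
--         col = [False] * n
--         for j in term.split("+"):
--             col = [a or b for a, b in zip(col, boolInputs[j])]
--         return col
--     return None
-- ===== Notes on version B (the rewrite author's own statement) =====
-- stated objective: alternative
-- what changed: Replaces A's row-major double loop with a carried break flag by a column-major fold: seed the column with [bool(lits)]*2**r (all-False for a literal-free term, as A yields, else the AND identity) and zip each literal's whole truth column in with AND/OR; the literal parser is rewritten as structural recursion with one-character lookahead.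
-- outside the precondition, e.g. on termTruthTable('AB', {'A': [False, False]}, 1, False, True): A returns [False, False], B raises KeyError
import Mathlib
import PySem

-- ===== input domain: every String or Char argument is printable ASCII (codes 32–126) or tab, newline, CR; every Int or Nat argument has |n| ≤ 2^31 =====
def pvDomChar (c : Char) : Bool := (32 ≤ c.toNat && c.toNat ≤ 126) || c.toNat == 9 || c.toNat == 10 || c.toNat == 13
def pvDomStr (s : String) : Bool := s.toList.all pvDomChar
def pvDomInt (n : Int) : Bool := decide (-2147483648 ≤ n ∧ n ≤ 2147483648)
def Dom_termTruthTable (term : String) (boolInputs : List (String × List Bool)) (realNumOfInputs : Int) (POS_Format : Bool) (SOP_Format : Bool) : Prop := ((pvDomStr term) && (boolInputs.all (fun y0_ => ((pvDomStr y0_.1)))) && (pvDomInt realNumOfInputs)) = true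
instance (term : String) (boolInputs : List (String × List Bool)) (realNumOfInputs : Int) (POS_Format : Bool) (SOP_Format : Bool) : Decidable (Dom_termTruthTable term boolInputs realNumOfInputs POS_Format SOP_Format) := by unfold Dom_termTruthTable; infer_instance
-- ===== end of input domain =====

-- B rebuilds the column column-major: it folds whole literal columns together with AND/OR,
-- seeding the SOP fold with [bool(lits)]*2**r, instead of A's row-major double loop with a
-- carried break flag; neither program mutates its arguments.

-- dict lookup boolInputs[j] (first match; keys compared as strings); shared primitive of both ports
def pvCol (boolInputs : List (String × List Bool)) (j : List Char) : List Bool :=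
  match boolInputs with
  | [] => []
  | (k, v) :: rest => if k.toList = j then v else pvCol rest j

-- ===== PORT A =====
-- boolInputs[j][i] (in range whenever Pre_ holds)
def pvLook (boolInputs : List (String × List Bool)) (j : List Char) (i : Nat) : Bool :=
  (pvCol boolInputs j).getD i false

-- one step of A's parsing loop body at index i (term[i:i+2] is (cs.drop i).take 2, exact for 0 ≤ i)
def pvAStep (cs : List Char) (acc : List (List Char)) (i : Nat) : List (List Char) :=
  if (cs.drop i).take 2 = [cs.getD i ' ', '\''] ∨ (cs.drop i).take 2 = [cs.getD i ' ', '`'] then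
    acc ++ [[cs.getD i ' ', '\'']]
  else if PySem.Chars.isalpha (cs.getD i ' ') then
    acc ++ [[cs.getD i ' ']]
  else acc

-- A's "for i in range(len(term))" parsing loop (the Python "i += 1" is a no-op on the range iterator)
def pvAParse (cs : List Char) : List (List Char) :=
  (List.range cs.length).foldl (pvAStep cs) []

-- A's inner SOP loop over termInputs with break, carrying termBool
def pvAInnerSOP (boolInputs : List (String × List Bool)) (i : Nat) :
    List (List Char) → Bool → Bool
  | [], tb => tb
  | j :: rest, tb =>
      if pvLook boolInputs j i = false then false
      else pvAInnerSOP boolInputs i rest true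

-- A's inner POS loop over termInputs with break, carrying termBool
def pvAInnerPOS (boolInputs : List (String × List Bool)) (i : Nat) :
    List (List Char) → Bool → Bool
  | [], tb => tb
  | j :: rest, tb =>
      if pvLook boolInputs j i = true then true
      else pvAInnerPOS boolInputs i rest false

def termTruthTable (term : String) (boolInputs : List (String × List Bool)) (realNumOfInputs : Int) (POS_Format : Bool) (SOP_Format : Bool) : List Bool :=
  if SOP_Format then
    let termInputs := pvAParse term.toList
    ((List.range (2 ^ realNumOfInputs.toNat)).foldl
      (fun (p : List Bool × Bool) i =>
        let tb := pvAInnerSOP boolInputs i termInputs p.2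
        (p.1 ++ [tb], tb))
      ([], false)).1
  else if POS_Format then
    let termInputs := PySem.Chars.splitOn term.toList ['+']
    ((List.range (2 ^ realNumOfInputs.toNat)).foldl
      (fun (p : List Bool × Bool) i =>
        let tb := pvAInnerPOS boolInputs i termInputs p.2
        (p.1 ++ [tb], tb))
      ([], false)).1
  else []  -- Python returns None here; excluded by Pre_

-- ===== PORT B =====
-- Source B's _parseLiterals: structural recursion with one-character lookahead (rest[:1] is rest.take 1)
def pvBParse : List Char → List (List Char)
  | [] => []
  | c :: rest =>
      if rest.take 1 = ['\''] ∨ rest.take 1 = ['`'] then [c, '\''] :: pvBParse rest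
      else if PySem.Chars.isalpha c then [c] :: pvBParse rest
      else pvBParse rest

def termTruthTable_alt (term : String) (boolInputs : List (String × List Bool)) (realNumOfInputs : Int) (POS_Format : Bool) (SOP_Format : Bool) : List Bool :=
  if SOP_Format then
    let lits := pvBParse term.toList
    -- a term with no literals at all yields the all-False column (A's convention)
    lits.foldl
      (fun col j => List.zipWith (· && ·) col (pvCol boolInputs j))
      (List.replicate (2 ^ realNumOfInputs.toNat) (!lits.isEmpty))
  else if POS_Format then
    (PySem.Chars.splitOn term.toList ['+']).foldl
      (fun col j => List.zipWith (· || ·) col (pvCol boolInputs j))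
      (List.replicate (2 ^ realNumOfInputs.toNat) false)
  else []  -- Python returns None here; excluded by Pre_

-- ===== PRECONDITION & SPEC =====
-- the literals a SOP term mentions (spec-level description of the term's shape, used only by Pre_)
def pvLits : List Char → List (List Char)
  | [] => []
  | c :: rest =>
      if rest.headD ' ' = '\'' ∨ rest.headD ' ' = '`' then [c, '\''] :: pvLits rest
      else if PySem.Chars.isalpha c then [c] :: pvLits rest
      else pvLits rest

-- Pre_ excludes: neither format flag set (Python returns None, not a list); negative exponent
-- (range(2**r) raises TypeError); and terms mentioning a variable that is missing from boolInputs
-- or whose column is shorter than 2^r (Python raises KeyError/IndexError on the rows it reaches;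
-- when an earlier false literal's break shields the bad access A still returns — see cites).
-- (0 < len ∧ r.toNat ≤ log2 len is exactly 2^r.toNat ≤ len, kept cheap to evaluate.)
def Pre_termTruthTable (term : String) (boolInputs : List (String × List Bool)) (realNumOfInputs : Int) (POS_Format : Bool) (SOP_Format : Bool) : Prop :=
  (SOP_Format = true ∨ POS_Format = true) ∧ 0 ≤ realNumOfInputs ∧
  ∀ j ∈ (if SOP_Format = true then pvLits term.toList
         else PySem.Chars.splitOn term.toList ['+']),
    0 < (pvCol boolInputs j).length ∧
    realNumOfInputs.toNat ≤ Nat.log2 (pvCol boolInputs j).length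

instance (term : String) (boolInputs : List (String × List Bool)) (realNumOfInputs : Int) (POS_Format : Bool) (SOP_Format : Bool) : Decidable (Pre_termTruthTable term boolInputs realNumOfInputs POS_Format SOP_Format) := by unfold Pre_termTruthTable; infer_instance

def pvWitness_termTruthTable : String × (List (String × List Bool)) × Int × Bool × Bool :=
  ("AB'", [("A", [false, true]), ("B'", [true, true])], 1, false, true)

def Spec_termTruthTable (term : String) (boolInputs : List (String × List Bool)) (realNumOfInputs : Int) (POS_Format : Bool) (SOP_Format : Bool) (out : List Bool) : Prop :=
  out = termTruthTable_alt term boolInputs realNumOfInputs POS_Format SOP_Format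

instance (term : String) (boolInputs : List (String × List Bool)) (realNumOfInputs : Int) (POS_Format : Bool) (SOP_Format : Bool) (out : List Bool) : Decidable (Spec_termTruthTable term boolInputs realNumOfInputs POS_Format SOP_Format out) := by unfold Spec_termTruthTable; infer_instance

-- ===== CLAIM (what is proved, stated in full; the proofs are below) =====
def Claim_equal_termTruthTable : Prop := ∀ (term : String) (boolInputs : List (String × List Bool)) (realNumOfInputs : Int) (POS_Format : Bool) (SOP_Format : Bool), Dom_termTruthTable term boolInputs realNumOfInputs POS_Format SOP_Format → Pre_termTruthTable term boolInputs realNumOfInputs POS_Format SOP_Format → Spec_termTruthTable term boolInputs realNumOfInputs POS_Format SOP_Format (termTruthTable term boolInputs realNumOfInputs POS_Format SOP_Format)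

-- ===== LEMMAS AND PROOFS =====

-- the per-index contribution of A's parsing loop body
def pvHit (cs : List Char) (i : Nat) : List (List Char) :=
  if (cs.drop i).take 2 = [cs.getD i ' ', '\''] ∨ (cs.drop i).take 2 = [cs.getD i ' ', '`'] then
    [[cs.getD i ' ', '\'']]
  else if PySem.Chars.isalpha (cs.getD i ' ') then [[cs.getD i ' ']]
  else []

theorem pvAStep_eq_append (cs : List Char) (acc : List (List Char)) (i : Nat) :
    pvAStep cs acc i = acc ++ pvHit cs i := by
  unfold pvAStep pvHit; split_ifs <;> simp

theorem pvAParse_eq_flatMap (cs : List Char) :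
    pvAParse cs = (List.range cs.length).flatMap (pvHit cs) := by
  unfold pvAParse
  have hf : pvAStep cs = fun acc i => acc ++ pvHit cs i := by
    funext acc i; exact pvAStep_eq_append cs acc i
  rw [hf, PySem.List.foldl_append_eq_flatMap]
  simp

theorem pvTake1_iff (l : List Char) (q : Char) (hq : q ≠ ' ') :
    l.take 1 = [q] ↔ l.headD ' ' = q := by
  cases l with
  | nil => simp; exact fun h => absurd h.symm hq
  | cons d rs => simp

theorem pvAParse_eq_pvLits (cs : List Char) : pvAParse cs = pvLits cs := by
  rw [pvAParse_eq_flatMap]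
  induction cs with
  | nil => rfl
  | cons c rest ih =>
    rw [List.length_cons, List.range_succ_eq_map, List.flatMap_cons, List.flatMap_map]
    have hshift : (fun a => pvHit (c :: rest) (Nat.succ a)) = pvHit rest := by
      funext i
      simp [pvHit]
    rw [hshift, ih]
    simp only [pvHit, pvLits, List.drop_zero, List.take_succ_cons, List.getD_cons_zero,
      List.cons.injEq, true_and, pvTake1_iff rest '\'' (by decide), pvTake1_iff rest '`' (by decide)]
    split_ifs <;> simp

theorem pvBParse_eq_pvLits (cs : List Char) : pvBParse cs = pvLits cs := by
  induction cs with
  | nil => rfl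
  | cons c rest ih =>
    simp only [pvBParse, pvLits, ih,
      pvTake1_iff rest '\'' (by decide), pvTake1_iff rest '`' (by decide)]

theorem pvAInnerSOP_true (bi : List (String × List Bool)) (i : Nat) :
    ∀ (L : List (List Char)), pvAInnerSOP bi i L true = L.all (fun j => pvLook bi j i) := by
  intro L
  induction L with
  | nil => rfl
  | cons j rest ih => cases h : pvLook bi j i <;> simp [pvAInnerSOP, h, ih]

theorem pvAInnerSOP_ne_nil (bi : List (String × List Bool)) (i : Nat)
    (L : List (List Char)) (hL : L ≠ []) (tb : Bool) :
    pvAInnerSOP bi i L tb = L.all (fun j => pvLook bi j i) := by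
  cases L with
  | nil => exact absurd rfl hL
  | cons j rest => cases h : pvLook bi j i <;> simp [pvAInnerSOP, h, pvAInnerSOP_true]

theorem pvAInnerPOS_false (bi : List (String × List Bool)) (i : Nat) :
    ∀ (L : List (List Char)), pvAInnerPOS bi i L false = L.any (fun j => pvLook bi j i) := by
  intro L
  induction L with
  | nil => rfl
  | cons j rest ih => cases h : pvLook bi j i <;> simp [pvAInnerPOS, h, ih]

theorem pvAInnerPOS_ne_nil (bi : List (String × List Bool)) (i : Nat)
    (L : List (List Char)) (hL : L ≠ []) (tb : Bool) :
    pvAInnerPOS bi i L tb = L.any (fun j => pvLook bi j i) := by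
  cases L with
  | nil => exact absurd rfl hL
  | cons j rest => cases h : pvLook bi j i <;> simp [pvAInnerPOS, h, pvAInnerPOS_false]

-- A's outer loop, row value independent of the carry
theorem pvAFold_map (f : Nat → Bool) (g : Nat → Bool → Bool) (hg : ∀ i tb, g i tb = f i) :
    ∀ (l : List Nat) (acc : List Bool) (t : Bool),
      ((l.foldl (fun (p : List Bool × Bool) i => (p.1 ++ [g i p.2], g i p.2)) (acc, t)).1
        = acc ++ l.map f) := by
  intro l
  induction l with
  | nil => simp
  | cons i rest ih =>
    intro acc t
    simp only [List.foldl_cons]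
    rw [ih]
    simp [hg]

-- A's outer loop with an empty termInputs: the carry never changes
theorem pvAFold_const (g : Nat → Bool → Bool) (hg : ∀ i tb, g i tb = tb) :
    ∀ (l : List Nat) (acc : List Bool),
      ((l.foldl (fun (p : List Bool × Bool) i => (p.1 ++ [g i p.2], g i p.2)) (acc, false)).1
        = acc ++ List.replicate l.length false) := by
  intro l
  induction l with
  | nil => simp
  | cons i rest ih =>
    intro acc
    simp only [List.foldl_cons]
    rw [hg, ih]
    simp [List.replicate_succ]

-- B's one zip step, as a map over row indices
theorem pvZip_map (n : Nat) (f : Nat → Bool) (col : List Bool) (hlen : n ≤ col.length)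
    (op : Bool → Bool → Bool) :
    List.zipWith op ((List.range n).map f) col
      = (List.range n).map (fun i => op (f i) (col.getD i false)) := by
  apply List.ext_getElem
  · simp [Nat.min_eq_left hlen]
  · intro i h1 h2
    have hi : i < n := by simpa using h2
    have hic : i < col.length := lt_of_lt_of_le hi hlen
    simp [List.getElem_zipWith, List.getD_eq_getElem?_getD, List.getElem?_eq_getElem hic]

-- B's column fold, as a map over row indices
theorem pvBFold_map (bi : List (String × List Bool)) (n : Nat) (op : Bool → Bool → Bool) :
    ∀ (L : List (List Char)) (f : Nat → Bool),
      (∀ j ∈ L, n ≤ (pvCol bi j).length) →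
      L.foldl (fun col j => List.zipWith op col (pvCol bi j)) ((List.range n).map f)
        = (List.range n).map (fun i => L.foldl (fun b j => op b (pvLook bi j i)) (f i)) := by
  intro L
  induction L with
  | nil => intro f _; simp
  | cons j rest ih =>
    intro f h
    simp only [List.foldl_cons]
    rw [pvZip_map n f (pvCol bi j) (h j (by simp)) op,
        ih _ (fun j' hj' => h j' (by simp [hj']))]
    simp [pvLook]

theorem pvFoldAnd (g : List Char → Bool) :
    ∀ (L : List (List Char)) (b : Bool),
      L.foldl (fun b j => b && g j) b = (b && L.all g) := by
  intro L
  induction L with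
  | nil => simp
  | cons j rest ih => intro b; simp [List.foldl_cons, ih, Bool.and_assoc]

theorem pvFoldOr (g : List Char → Bool) :
    ∀ (L : List (List Char)) (b : Bool),
      L.foldl (fun b j => b || g j) b = (b || L.any g) := by
  intro L
  induction L with
  | nil => simp
  | cons j rest ih => intro b; simp [List.foldl_cons, ih, Bool.or_assoc]

theorem pv_replicate_map (n : Nat) (b : Bool) :
    List.replicate n b = (List.range n).map (fun _ => b) := by
  simp [List.map_const']

-- ===== VERDICT (by name: the statement is the Claim_ definition above) =====
-- 2^r ≤ len, recovered from Pre_'s log2 phrasing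
theorem pv_pre_len (r : Int) (m : Nat) (h0 : 0 < m) (hlog : r.toNat ≤ Nat.log2 m) :
    2 ^ r.toNat ≤ m := by
  rw [Nat.log2_eq_log_two] at hlog
  exact (Nat.pow_le_iff_le_log (by norm_num) h0.ne').mpr hlog

theorem pv_sop_A (bi : List (String × List Bool)) (term : String) (r : Int) (POS : Bool)
    (L : List (List Char)) (hL : L = pvLits term.toList) (hne : L ≠ []) :
    termTruthTable term bi r POS true
      = (List.range (2 ^ r.toNat)).map (fun i => L.all (fun j => pvLook bi j i)) := by
  unfold termTruthTable
  rw [if_pos rfl]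
  simp only [pvAParse_eq_pvLits, ← hL]
  rw [pvAFold_map (fun i => L.all (fun j => pvLook bi j i))
        (fun i tb => pvAInnerSOP bi i L tb)
        (fun i tb => pvAInnerSOP_ne_nil bi i L hne tb)]
  simp

theorem pv_sop_B (bi : List (String × List Bool)) (term : String) (r : Int) (POS : Bool)
    (L : List (List Char)) (hL : L = pvLits term.toList) (hne : L ≠ [])
    (hlen : ∀ j ∈ L, 2 ^ r.toNat ≤ (pvCol bi j).length) :
    termTruthTable_alt term bi r POS true
      = (List.range (2 ^ r.toNat)).map (fun i => L.all (fun j => pvLook bi j i)) := by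
  unfold termTruthTable_alt
  rw [if_pos rfl]
  simp only [pvBParse_eq_pvLits, ← hL]
  rw [show (!L.isEmpty) = true by simp [List.isEmpty_iff, hne]]
  rw [pv_replicate_map, pvBFold_map bi (2 ^ r.toNat) (· && ·) L _ hlen]
  congr 1
  funext i
  rw [pvFoldAnd]
  simp

theorem termTruthTable_spec : Claim_equal_termTruthTable := by
  intro term bi r POS SOP _ hpre
  obtain ⟨hflag, hr, hlen⟩ := hpre
  show termTruthTable term bi r POS SOP = termTruthTable_alt term bi r POS SOP
  cases SOP with
  | true =>
    simp only [if_pos rfl] at hlen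
    cases hL : pvLits term.toList with
    | nil =>
      -- no literals: A's carried-over False column; B's seed is already all-False
      unfold termTruthTable termTruthTable_alt
      rw [if_pos rfl, if_pos rfl]
      dsimp only
      rw [pvAParse_eq_pvLits, pvBParse_eq_pvLits, hL]
      rw [pvAFold_const (fun i tb => pvAInnerSOP bi i [] tb) (fun i tb => rfl)]
      simp
    | cons j0 rest =>
      have hne : pvLits term.toList ≠ [] := by rw [hL]; simp
      have hlen' : ∀ j ∈ pvLits term.toList, 2 ^ r.toNat ≤ (pvCol bi j).length := by
        intro j hj
        obtain ⟨h0, hlog⟩ := hlen j hj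
        exact pv_pre_len r _ h0 hlog
      rw [pv_sop_A bi term r POS _ rfl hne, pv_sop_B bi term r POS _ rfl hne hlen']
  | false =>
    -- POS branch (Pre_ forces POS = true here)
    have hPOS : POS = true := by
      rcases hflag with h | h
      · exact absurd h (by simp)
      · exact h
    subst hPOS
    simp only [Bool.false_eq_true, if_false] at hlen
    unfold termTruthTable termTruthTable_alt
    rw [if_neg (by simp), if_pos rfl, if_neg (by simp), if_pos rfl]
    cases hsp : PySem.Chars.splitOn term.toList ['+'] with
    | nil =>
      dsimp only
      rw [pvAFold_const (fun i tb => pvAInnerPOS bi i [] tb) (fun i tb => rfl)]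
      simp
    | cons j0 rest =>
      dsimp only
      rw [hsp] at hlen
      have hne : (j0 :: rest : List (List Char)) ≠ [] := by simp
      have hlen' : ∀ j ∈ (j0 :: rest : List (List Char)), 2 ^ r.toNat ≤ (pvCol bi j).length := by
        intro j hj
        obtain ⟨h0, hlog⟩ := hlen j hj
        exact pv_pre_len r _ h0 hlog
      rw [pvAFold_map (fun i => (j0 :: rest).any (fun j => pvLook bi j i))
            (fun i tb => pvAInnerPOS bi i (j0 :: rest) tb)
            (fun i tb => pvAInnerPOS_ne_nil bi i (j0 :: rest) hne tb)]
      rw [pv_replicate_map, pvBFold_map bi (2 ^ r.toNat) (· || ·) (j0 :: rest) _ hlen']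
      simp only [List.nil_append]
      congr 1
      funext i
      rw [pvFoldOr]
      simp
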